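-- pv_equiv track=rewrite | github.com/NiekMooij/Advent-of-Code-2023 | day 2/day2.py | get_minimum_set_of_cubes
-- ===== SOURCE A (Python) =====
-- from typing import List, Dict
--
-- def get_minimum_set_of_cubes(game: List[Dict[str, int]]) -> List[int]:
--     """
--     Get the minimum set of cubes required for a game.
--
--     Args:
--     - game (List[Dict[str, int]]): List of dictionaries representing the attributes of the game.
--
--     Returns:
--     - List[int]: List of the maximum values for each color in the game.
--     """
--     red_values = []
--     green_values = []
--     blue_values = []
--     for item in game:
--         if 'red' in item:
--             red_values.append(item['red'])
--         if 'green' in item: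
--             green_values.append(item['green'])
--         if 'blue' in item:
--             blue_values.append(item['blue'])
--
--     minimum_set_of_cubes = [max(red_values), max(green_values), max(blue_values)]
--
--     return minimum_set_of_cubes
-- ===== SOURCE B (Python) =====
-- from typing import List, Dict
--
-- def get_minimum_set_of_cubes(game: List[Dict[str, int]]) -> List[int]:
--     return [max(item[color] for item in game if color in item)
--             for color in ('red', 'green', 'blue')]
-- ===== Notes on version B (the rewrite author's own statement) =====
-- stated objective: simpler
-- what changed: One loop that builds three intermediate lists followed by three max() calls is replaced by three independent filtered generator passes, one per color, with no intermediate lists.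
import Mathlib
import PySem

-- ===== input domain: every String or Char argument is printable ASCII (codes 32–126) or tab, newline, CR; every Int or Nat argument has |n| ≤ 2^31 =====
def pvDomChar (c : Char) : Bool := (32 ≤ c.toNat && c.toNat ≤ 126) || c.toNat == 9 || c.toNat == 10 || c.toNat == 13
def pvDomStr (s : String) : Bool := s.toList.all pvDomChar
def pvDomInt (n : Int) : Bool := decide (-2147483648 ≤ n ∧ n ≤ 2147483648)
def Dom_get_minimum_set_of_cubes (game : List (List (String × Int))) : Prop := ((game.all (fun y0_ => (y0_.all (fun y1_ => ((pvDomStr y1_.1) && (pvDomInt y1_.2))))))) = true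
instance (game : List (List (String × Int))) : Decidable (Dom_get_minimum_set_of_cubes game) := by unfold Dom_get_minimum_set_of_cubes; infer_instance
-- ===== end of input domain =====

-- B replaces A's single loop building three lists (then three maxima) by three independent
-- filtered passes, one per color: simpler, no intermediate state tuple.

-- ===== PORT A =====
-- one pass over the game, appending to three lists; then [max r, max g, max b]
def get_minimum_set_of_cubes (game : List (List (String × Int))) : List Int :=
  let acc := game.foldl
    (fun (acc : List Int × List Int × List Int) item =>
      let d := PySem.Dict.mk item
      let r := if d.contains "red" then acc.1 ++ [d.getD "red" 0] else acc.1
      let g := if d.contains "green" then acc.2.1 ++ [d.getD "green" 0] else acc.2.1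
      let b := if d.contains "blue" then acc.2.2 ++ [d.getD "blue" 0] else acc.2.2
      (r, g, b))
    ([], [], [])
  [(PySem.List.max? acc.1 (fun x => x)).getD 0,
   (PySem.List.max? acc.2.1 (fun x => x)).getD 0,
   (PySem.List.max? acc.2.2 (fun x => x)).getD 0]

-- ===== PORT B =====
-- max(item[c] for item in game if c in item): one filtered pass per color
def pvColorMax (game : List (List (String × Int))) (c : String) : Int :=
  (PySem.List.max? (game.filterMap (fun item => (PySem.Dict.mk item).get? c)) (fun x => x)).getD 0

def get_minimum_set_of_cubes_alt (game : List (List (String × Int))) : List Int :=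
  ["red", "green", "blue"].map (pvColorMax game)

-- ===== PRECONDITION & SPEC =====
-- Pre_ excludes games in which some of the three colors occurs in no round: there the
-- intermediate list (resp. generator) for that color is empty and both A and B raise
-- ValueError from max().
def Pre_get_minimum_set_of_cubes (game : List (List (String × Int))) : Prop :=
  (game.any (fun item => item.any (fun p => p.1 == "red"))) = true ∧
  (game.any (fun item => item.any (fun p => p.1 == "green"))) = true ∧
  (game.any (fun item => item.any (fun p => p.1 == "blue"))) = true
instance (game : List (List (String × Int))) : Decidable (Pre_get_minimum_set_of_cubes game) := by unfold Pre_get_minimum_set_of_cubes; infer_instance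

def pvWitness_get_minimum_set_of_cubes : (List (List (String × Int))) :=
  [[("red", 1), ("blue", 2)], [("green", 3), ("red", 5)]]

def Spec_get_minimum_set_of_cubes (game : List (List (String × Int))) (out : List Int) : Prop := out = get_minimum_set_of_cubes_alt game
instance (game : List (List (String × Int))) (out : List Int) : Decidable (Spec_get_minimum_set_of_cubes game out) := by unfold Spec_get_minimum_set_of_cubes; infer_instance

-- ===== CLAIM (what is proved, stated in full; the proofs are below) =====
def Claim_equal_get_minimum_set_of_cubes : Prop := ∀ (game : List (List (String × Int))), Dom_get_minimum_set_of_cubes game → Pre_get_minimum_set_of_cubes game → Spec_get_minimum_set_of_cubes game (get_minimum_set_of_cubes game)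

-- ===== LEMMAS AND PROOFS =====
-- A's fold, started from any accumulator, appends exactly the per-color filterMaps.
theorem pv_fold_eq (game : List (List (String × Int))) :
    ∀ (r g b : List Int),
    game.foldl
      (fun (acc : List Int × List Int × List Int) item =>
        let d := PySem.Dict.mk item
        let r := if d.contains "red" then acc.1 ++ [d.getD "red" 0] else acc.1
        let g := if d.contains "green" then acc.2.1 ++ [d.getD "green" 0] else acc.2.1
        let b := if d.contains "blue" then acc.2.2 ++ [d.getD "blue" 0] else acc.2.2
        (r, g, b))
      (r, g, b)
    = (r ++ game.filterMap (fun item => (PySem.Dict.mk item).get? "red"),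
       g ++ game.filterMap (fun item => (PySem.Dict.mk item).get? "green"),
       b ++ game.filterMap (fun item => (PySem.Dict.mk item).get? "blue")) := by
  induction game with
  | nil => simp
  | cons item rest ih =>
    intro r g b
    simp only [List.foldl_cons, ih]
    have h : ∀ (c : String) (l : List Int),
        (if (PySem.Dict.mk item).contains c then l ++ [(PySem.Dict.mk item).getD c 0] else l)
          ++ rest.filterMap (fun it => (PySem.Dict.mk it).get? c)
        = l ++ (item :: rest).filterMap (fun it => (PySem.Dict.mk it).get? c) := by
      intro c l
      rw [PySem.Dict.contains_eq_isSome_get?, List.filterMap_cons]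
      cases hc : (PySem.Dict.mk item).get? c with
      | none => simp [hc]
      | some v => simp [hc, PySem.Dict.getD_eq_get?_getD]
    rw [h "red" r, h "green" g, h "blue" b]

-- ===== VERDICT (by name: the statement is the Claim_ definition above) =====
theorem get_minimum_set_of_cubes_spec : Claim_equal_get_minimum_set_of_cubes := by
  intro game _ _
  unfold Spec_get_minimum_set_of_cubes get_minimum_set_of_cubes get_minimum_set_of_cubes_alt pvColorMax
  rw [pv_fold_eq game [] [] []]
  simp
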